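-- pv_equiv track=rewrite | github.com/PedroPaivaC/Integer-to-Word | tests.py | classSelectionAux
-- ===== SOURCE A (Python) =====
-- def classSelectionAux(grouped_list: list):
--
--     grouped_list = grouped_list
--
--     greater_classes = None
--
--     if len(grouped_list) % 6 == 0:
--         greater_classes = ['quadrillion', 'trillion', 'billion', 'million', 'thousand', 'regular']
--     elif len(grouped_list) % 5 == 0:
--         greater_classes = ['trillion', 'billion', 'million', 'thousand', 'regular']
--     elif len(grouped_list) % 4 == 0:
--         greater_classes = ['billion', 'million', 'thousand', 'regular']
--     elif len(grouped_list) % 3 == 0: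
--         greater_classes = ['million', 'thousand', 'regular']
--     elif len(grouped_list) % 2 == 0:
--         greater_classes = ['thousand', 'regular']
--
--     for index, class_ in enumerate(greater_classes):
--         grouped_list[index].append(class_)
--
--     return grouped_list
-- ===== SOURCE B (Python) =====
-- REGULAR_UP = ['regular', 'thousand', 'million', 'billion', 'trillion', 'quadrillion']
--
--
-- def classSelectionAux(grouped_list: list):
--     # Return-value equivalence only: A mutates its argument in place, B builds a new list.
--     n = len(grouped_list)
--     d = max(k for k in range(2, 7) if n % k == 0)
--     return _attach(grouped_list, d)
--
--
-- def _attach(chunks, k):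
--     # Recursively label the first k chunks, counting DOWN: the chunk k steps from the
--     # end of the labelled prefix gets REGULAR_UP[k-1] ('regular' is always the last label).
--     if k == 0:
--         return chunks
--     return [chunks[0] + [REGULAR_UP[k - 1]]] + _attach(chunks[1:], k - 1)
-- ===== Notes on version B (the rewrite author's own statement) =====
-- stated objective: simpler
-- what changed: Replaces the five hard-coded label lists, the if/elif cascade and the in-place enumerate/append loop by a max-over-divisors comprehension and a countdown recursion that labels chunks from a single 'regular'-first list indexed by the remaining count.
import Mathlib
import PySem

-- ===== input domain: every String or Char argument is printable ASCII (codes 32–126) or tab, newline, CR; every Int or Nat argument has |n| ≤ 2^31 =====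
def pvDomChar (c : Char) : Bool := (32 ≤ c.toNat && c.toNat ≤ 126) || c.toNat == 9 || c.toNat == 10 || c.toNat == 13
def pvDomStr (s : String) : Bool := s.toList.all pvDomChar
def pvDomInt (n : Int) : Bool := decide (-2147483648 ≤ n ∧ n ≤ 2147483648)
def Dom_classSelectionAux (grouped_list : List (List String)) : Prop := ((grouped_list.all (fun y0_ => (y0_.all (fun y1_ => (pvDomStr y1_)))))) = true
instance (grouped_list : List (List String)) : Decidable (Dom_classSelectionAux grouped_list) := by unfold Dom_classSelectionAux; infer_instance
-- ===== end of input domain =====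

-- B: a max-over-divisors comprehension plus a countdown recursion over a single 'regular'-first
-- label list, instead of five literal lists, an if/elif cascade and an in-place append loop
-- (return-value equivalence only: A mutates its argument in place, B builds a new list).


-- ===== PORT A =====
-- the 'for index, class_ in enumerate(greater_classes): grouped_list[index].append(class_)' loop,
-- mutating position i then moving to i+1 (index out of range = IndexError, excluded by Pre_)
def pvApplyLoopA (acc : List (List String)) (i : Nat) : List String → List (List String)
  | [] => acc
  | c :: rest => pvApplyLoopA (acc.set i (acc.getD i [] ++ [c])) (i + 1) rest

def classSelectionAux (grouped_list : List (List String)) : List (List String) :=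
  let greater_classes : Option (List String) :=
    if grouped_list.length % 6 == 0 then
      some ["quadrillion", "trillion", "billion", "million", "thousand", "regular"]
    else if grouped_list.length % 5 == 0 then
      some ["trillion", "billion", "million", "thousand", "regular"]
    else if grouped_list.length % 4 == 0 then
      some ["billion", "million", "thousand", "regular"]
    else if grouped_list.length % 3 == 0 then
      some ["million", "thousand", "regular"]
    else if grouped_list.length % 2 == 0 then
      some ["thousand", "regular"]
    else none
  match greater_classes with
  | none => []   -- Python: TypeError (iterating None), excluded by Pre_
  | some labels => pvApplyLoopA grouped_list 0 labels

-- ===== PORT B =====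
def pvRegularUp : List String :=
  ["regular", "thousand", "million", "billion", "trillion", "quadrillion"]

-- _attach(chunks, k): label first k chunks counting down, REGULAR_UP[k-1] for the current one
def pvAttach : List (List String) → Nat → List (List String)
  | chunks, 0 => chunks
  | [], _ + 1 => []   -- Python: IndexError (chunks[0] on []), unreachable inside Pre_
  | c :: rest, k + 1 => (c ++ [pvRegularUp.getD k ""]) :: pvAttach rest k

def classSelectionAux_alt (grouped_list : List (List String)) : List (List String) :=
  let n := grouped_list.length
  -- max(k for k in range(2, 7) if n % k == 0); none = Python ValueError, excluded by Pre_
  match ((List.range' 2 5).filter (fun k => n % k == 0)).max? with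
  | none => []
  | some d => pvAttach grouped_list d

-- ===== PRECONDITION & SPEC =====
-- Pre_ excludes exactly the inputs on which A raises: the empty list (IndexError) and lengths
-- not divisible by any of 2..6 (greater_classes stays None, TypeError).
def Pre_classSelectionAux (grouped_list : List (List String)) : Prop :=
  0 < grouped_list.length ∧
    (grouped_list.length % 2 = 0 ∨ grouped_list.length % 3 = 0 ∨ grouped_list.length % 5 = 0)
instance (grouped_list : List (List String)) : Decidable (Pre_classSelectionAux grouped_list) := by
  unfold Pre_classSelectionAux; infer_instance

def pvWitness_classSelectionAux : List (List String) := [["one"], ["two"]]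

def Spec_classSelectionAux (grouped_list : List (List String)) (out : List (List String)) : Prop := out = classSelectionAux_alt grouped_list
instance (grouped_list : List (List String)) (out : List (List String)) : Decidable (Spec_classSelectionAux grouped_list out) := by unfold Spec_classSelectionAux; infer_instance

-- ===== CLAIM (what is proved, stated in full; the proofs are below) =====
def Claim_equal_classSelectionAux : Prop := ∀ (grouped_list : List (List String)), Dom_classSelectionAux grouped_list → Pre_classSelectionAux grouped_list → Spec_classSelectionAux grouped_list (classSelectionAux grouped_list)

-- ===== LEMMAS AND PROOFS =====

def pvMaster : List String :=
  ["quadrillion", "trillion", "billion", "million", "thousand", "regular"]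

lemma pvApplyLoopA_cons_succ (cs : List String) : ∀ (i : Nat) (y : List String) (ys : List (List String)),
    pvApplyLoopA (y :: ys) (i + 1) cs = y :: pvApplyLoopA ys i cs := by
  induction cs with
  | nil => intro i y ys; rfl
  | cons c rest ih =>
    intro i y ys
    simp only [pvApplyLoopA, List.set, List.getD]
    simp [ih]

lemma pvApplyLoopA_eq_zip (labels : List String) : ∀ (gl : List (List String)),
    labels.length ≤ gl.length →
    pvApplyLoopA gl 0 labels =
      ((gl.zip labels).map (fun p => p.1 ++ [p.2])) ++ gl.drop labels.length := by
  induction labels with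
  | nil => intro gl _; simp [pvApplyLoopA]
  | cons c cs ih =>
    intro gl hlen
    match gl with
    | [] => simp at hlen
    | x :: xs =>
      simp only [List.length_cons, Nat.add_le_add_iff_right] at hlen
      simp only [pvApplyLoopA, List.set, List.getD]
      rw [pvApplyLoopA_cons_succ]
      simp only [List.zip_cons_cons, List.map_cons, List.length_cons, List.drop_succ_cons,
        List.cons_append]
      simp only [List.getElem?_cons_zero, Option.getD_some]
      rw [ih xs hlen]

lemma pvMaster_drop_cons (k : Nat) (hk : k + 1 ≤ 6) :
    pvMaster.drop (6 - (k + 1)) = pvRegularUp.getD k "" :: pvMaster.drop (6 - k) := by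
  have hk5 : k ≤ 5 := by omega
  interval_cases k <;> rfl

lemma pvAttach_eq_zip : ∀ (k : Nat), k ≤ 6 → ∀ (gl : List (List String)), k ≤ gl.length →
    pvAttach gl k =
      ((gl.zip (pvMaster.drop (6 - k))).map (fun p => p.1 ++ [p.2])) ++ gl.drop k := by
  intro k
  induction k with
  | zero => intro _ gl _; simp [pvAttach, pvMaster]
  | succ k ih =>
    intro hk gl hlen
    match gl with
    | [] => simp at hlen
    | x :: xs =>
      simp only [List.length_cons, Nat.add_le_add_iff_right] at hlen
      rw [pvMaster_drop_cons k hk]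
      simp only [pvAttach, List.zip_cons_cons, List.map_cons, List.drop_succ_cons,
        List.cons_append]
      rw [ih (by omega) xs hlen]

-- the cascade's divisor equals max(k for k in range(2,7) if n % k == 0)
lemma pvMax6 (n : Nat) (h6 : n % 6 = 0) :
    ((List.range' 2 5).filter (fun k => n % k == 0)).max? = some 6 := by
  have b2 : (n % 2 == 0) = true := by simp; omega
  have b3 : (n % 3 == 0) = true := by simp; omega
  have b6 : (n % 6 == 0) = true := by simp [h6]
  cases b4 : (n % 4 == 0) <;> cases b5 : (n % 5 == 0) <;>
    simp [List.range', List.filter, b2, b3, b4, b5, b6]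

lemma pvMax5 (n : Nat) (h6 : ¬ n % 6 = 0) (h5 : n % 5 = 0) :
    ((List.range' 2 5).filter (fun k => n % k == 0)).max? = some 5 := by
  have b5 : (n % 5 == 0) = true := by simp [h5]
  have b6 : (n % 6 == 0) = false := by simp [h6]
  cases b2 : (n % 2 == 0) <;> cases b3 : (n % 3 == 0) <;> cases b4 : (n % 4 == 0) <;>
    simp [List.range', List.filter, b2, b3, b4, b5, b6]

lemma pvMax4 (n : Nat) (h6 : ¬ n % 6 = 0) (h5 : ¬ n % 5 = 0) (h4 : n % 4 = 0) :
    ((List.range' 2 5).filter (fun k => n % k == 0)).max? = some 4 := by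
  have b2 : (n % 2 == 0) = true := by simp; omega
  have b3 : (n % 3 == 0) = false := by simp; omega
  have b4 : (n % 4 == 0) = true := by simp [h4]
  have b5 : (n % 5 == 0) = false := by simp [h5]
  have b6 : (n % 6 == 0) = false := by simp [h6]
  simp [List.range', List.filter, b2, b3, b4, b5, b6]

lemma pvMax3 (n : Nat) (h6 : ¬ n % 6 = 0) (h5 : ¬ n % 5 = 0) (h4 : ¬ n % 4 = 0)
    (h3 : n % 3 = 0) :
    ((List.range' 2 5).filter (fun k => n % k == 0)).max? = some 3 := by
  have b2 : (n % 2 == 0) = false := by simp; omega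
  have b3 : (n % 3 == 0) = true := by simp [h3]
  have b4 : (n % 4 == 0) = false := by simp [h4]
  have b5 : (n % 5 == 0) = false := by simp [h5]
  have b6 : (n % 6 == 0) = false := by simp [h6]
  simp [List.range', List.filter, b2, b3, b4, b5, b6]

lemma pvMax2 (n : Nat) (h6 : ¬ n % 6 = 0) (h5 : ¬ n % 5 = 0) (h4 : ¬ n % 4 = 0)
    (h3 : ¬ n % 3 = 0) (h2 : n % 2 = 0) :
    ((List.range' 2 5).filter (fun k => n % k == 0)).max? = some 2 := by
  have b2 : (n % 2 == 0) = true := by simp [h2]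
  have b3 : (n % 3 == 0) = false := by simp [h3]
  have b4 : (n % 4 == 0) = false := by simp [h4]
  have b5 : (n % 5 == 0) = false := by simp [h5]
  have b6 : (n % 6 == 0) = false := by simp [h6]
  simp [List.range', List.filter, b2, b3, b4, b5, b6]

theorem classSelectionAux_spec : Claim_equal_classSelectionAux := by
  intro gl _ hpre
  obtain ⟨hpos, hdvd⟩ := hpre
  unfold Spec_classSelectionAux classSelectionAux classSelectionAux_alt
  simp only [beq_iff_eq]
  set n := gl.length with hn
  have key : ∀ d : Nat, 0 < d → n % d = 0 → d ≤ n := fun d hd hmod =>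
    Nat.le_of_dvd hpos (Nat.dvd_of_mod_eq_zero hmod)
  split_ifs with h6 h5 h4 h3 h2
  · rw [pvMax6 n h6]
    show pvApplyLoopA gl 0 (pvMaster.drop 0) = pvAttach gl 6
    rw [pvAttach_eq_zip 6 (by omega) gl (key 6 (by norm_num) h6),
      pvApplyLoopA_eq_zip _ gl (by simpa [pvMaster] using key 6 (by norm_num) h6)]
    simp [pvMaster]
  · rw [pvMax5 n h6 h5]
    show pvApplyLoopA gl 0 (pvMaster.drop 1) = pvAttach gl 5
    rw [pvAttach_eq_zip 5 (by omega) gl (key 5 (by norm_num) h5),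
      pvApplyLoopA_eq_zip _ gl (by simpa [pvMaster] using key 5 (by norm_num) h5)]
    simp [pvMaster]
  · rw [pvMax4 n h6 h5 h4]
    show pvApplyLoopA gl 0 (pvMaster.drop 2) = pvAttach gl 4
    rw [pvAttach_eq_zip 4 (by omega) gl (key 4 (by norm_num) h4),
      pvApplyLoopA_eq_zip _ gl (by simpa [pvMaster] using key 4 (by norm_num) h4)]
    simp [pvMaster]
  · rw [pvMax3 n h6 h5 h4 h3]
    show pvApplyLoopA gl 0 (pvMaster.drop 3) = pvAttach gl 3
    rw [pvAttach_eq_zip 3 (by omega) gl (key 3 (by norm_num) h3),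
      pvApplyLoopA_eq_zip _ gl (by simpa [pvMaster] using key 3 (by norm_num) h3)]
    simp [pvMaster]
  · rw [pvMax2 n h6 h5 h4 h3 h2]
    show pvApplyLoopA gl 0 (pvMaster.drop 4) = pvAttach gl 2
    rw [pvAttach_eq_zip 2 (by omega) gl (key 2 (by norm_num) h2),
      pvApplyLoopA_eq_zip _ gl (by simpa [pvMaster] using key 2 (by norm_num) h2)]
    simp [pvMaster]
  · exfalso; omega
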